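-- pv_equiv track=rewrite | github.com/antimatter96/programming_in_python | week9/assignments_graded/5.py | trending
-- ===== SOURCE A (Python) =====
-- def num_of_occurences(subject_topics, topic):
--   n = 0
--   for s in subject_topics:
--     if topic in s:
--       n = n + 1
--       continue
--   return n
--
-- def trending(subject_topics):
--   subject_topics_set_flat = set()
--
--   for e in subject_topics:
--     subject_topics_set_flat = subject_topics_set_flat.union(set(e))
--
--   max_occ = 0
--   max_occ_count = 0
--   min_occ = 99999999999
--   min_occ_count = 0
--
--   for topic in subject_topics_set_flat:
--     occ = num_of_occurences(subject_topics, topic)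
--
--     if occ > max_occ:
--       max_occ = occ
--       max_occ_count = 1
--     elif occ == max_occ:
--       max_occ_count += 1
--
--     if occ < min_occ:
--       min_occ = occ
--       min_occ_count = 1
--     elif occ == min_occ:
--       min_occ_count += 1
--
--   return (max_occ_count, min_occ_count)
-- ===== SOURCE B (Python) =====
-- def trending(subject_topics):
--   # One pass builds a per-topic occurrence table (each subject contributes at most
--   # once per topic), then the answer is the count of the extremal value in the
--   # table; the extrema are seeded with A's initial values (0 / 99999999999) so the
--   # return value agrees with A on every input, including the degenerate ones.
--   counts = {}
--   for s in subject_topics: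
--     for t in set(s):
--       counts[t] = counts.get(t, 0) + 1
--   vals = list(counts.values())
--   return (vals.count(max([0] + vals)), vals.count(min([99999999999] + vals)))
-- ===== Notes on version B (the rewrite author's own statement) =====
-- stated objective: faster
-- what changed: A flattens all topics into a set and then, for every topic, re-scans the whole subject list inside a running max/min-with-count tracker; B builds a per-topic occurrence dict in one pass over the subjects and returns the count of the maximal/minimal value of the table (extrema seeded with A's initial values so the results coincide everywhere).
import Mathlib
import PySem

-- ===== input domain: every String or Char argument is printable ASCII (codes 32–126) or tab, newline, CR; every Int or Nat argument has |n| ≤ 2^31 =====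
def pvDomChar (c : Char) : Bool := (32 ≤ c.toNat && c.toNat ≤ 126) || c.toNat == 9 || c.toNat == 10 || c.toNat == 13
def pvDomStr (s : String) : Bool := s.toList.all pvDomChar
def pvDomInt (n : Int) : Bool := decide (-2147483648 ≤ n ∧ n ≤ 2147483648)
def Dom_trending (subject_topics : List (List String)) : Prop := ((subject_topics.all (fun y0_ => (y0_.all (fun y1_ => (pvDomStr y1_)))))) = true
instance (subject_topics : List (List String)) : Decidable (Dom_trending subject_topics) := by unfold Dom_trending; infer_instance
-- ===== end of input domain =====

-- B replaces A's per-topic re-scan of all subjects with a one-pass per-topic occurrence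
-- dict followed by a count of the extremal table value (return value equivalence).


-- ===== PORT A =====
-- helper: the Python helper num_of_occurences (scan of subject_topics counting hits)
def numOfOccurences (subject_topics : List (List String)) (topic : String) : Int :=
  subject_topics.foldl (fun n s => if topic ∈ s then n + 1 else n) 0

-- the max-tracking branch pair (if occ > max_occ … elif occ == max_occ …)
def pvMaxStep (p : Int × Int) (occ : Int) : Int × Int :=
  if occ > p.1 then (occ, 1) else if occ = p.1 then (p.1, p.2 + 1) else p

-- the min-tracking branch pair (if occ < min_occ … elif occ == min_occ …)
def pvMinStep (p : Int × Int) (occ : Int) : Int × Int :=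
  if occ < p.1 then (occ, 1) else if occ = p.1 then (p.1, p.2 + 1) else p

def trending (subject_topics : List (List String)) : List Int :=
  let subject_topics_set_flat : PySem.Set String :=
    subject_topics.foldl (fun acc e => PySem.Set.union acc (PySem.Set.ofList e)) PySem.Set.empty
  let st :=
    subject_topics_set_flat.foldl
      (fun (st : (Int × Int) × (Int × Int)) topic =>
        let occ := numOfOccurences subject_topics topic
        (pvMaxStep st.1 occ, pvMinStep st.2 occ))
      ((0, 0), (99999999999, 0))
  [st.1.2, st.2.2]

-- ===== PORT B =====
def trending_alt (subject_topics : List (List String)) : List Int :=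
  let counts : PySem.Dict String Int :=
    subject_topics.foldl
      (fun d s => (PySem.Set.ofList s).foldl (fun d t => d.modify t 0 (· + 1)) d)
      PySem.Dict.empty
  let vals := counts.values
  [PySem.List.count vals ((PySem.List.max? (((0 : Int) :: vals)) (fun v => v)).getD 0),
   PySem.List.count vals ((PySem.List.min? (((99999999999 : Int) :: vals)) (fun v => v)).getD 0)]

-- ===== PRECONDITION & SPEC =====
def Spec_trending (subject_topics : List (List String)) (out : List Int) : Prop := out = trending_alt subject_topics
instance (subject_topics : List (List String)) (out : List Int) : Decidable (Spec_trending subject_topics out) := by unfold Spec_trending; infer_instance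

-- ===== CLAIM (what is proved, stated in full; the proofs are below) =====
def Claim_equal_trending : Prop := ∀ (subject_topics : List (List String)), Dom_trending subject_topics → Spec_trending subject_topics (trending subject_topics)

-- ===== LEMMAS AND PROOFS =====

-- A's running max/(count of max) tracker, characterised for an arbitrary start state.
lemma pvMaxFold_eq (L : List Int) (m mc : Int) :
    L.foldl pvMaxStep (m, mc)
      = (L.foldl max m,
         if L.foldl max m > m then (List.count (L.foldl max m) L : Int)
         else mc + List.count m L) := by
  induction L generalizing m mc with
  | nil => simp
  | cons x t ih =>
      have hle := (PySem.List.le_foldl_max t x).1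
      rcases lt_trichotomy m x with h | h | h
      · have hstep : pvMaxStep (m, mc) x = (x, 1) := by simp [pvMaxStep, h]
        have hmax : max m x = x := by omega
        simp only [List.foldl_cons, hstep, ih, hmax]
        have hMm : m < t.foldl max x := lt_of_lt_of_le h hle
        simp only [hMm, if_pos, gt_iff_lt]
        by_cases hgt : x < t.foldl max x
        · have hne : ¬ (x = t.foldl max x) := by omega
          simp [hgt, hne]
        · have hx : t.foldl max x = x := by omega
          simp [hx]
          omega
      · have hstep : pvMaxStep (m, mc) x = (m, mc + 1) := by
          simp [pvMaxStep, h]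
        have hmax : max m x = m := by omega
        simp only [List.foldl_cons, hstep, ih, hmax]
        by_cases hgt : m < t.foldl max m
        · have hne : ¬ (x = t.foldl max m) := by omega
          simp [hgt, hne]
        · simp [List.count_cons, h]
          omega
      · have hstep : pvMaxStep (m, mc) x = (m, mc) := by
          simp only [pvMaxStep]
          rw [if_neg (by omega), if_neg (by omega)]
        have hmax : max m x = m := by omega
        simp only [List.foldl_cons, hstep, ih, hmax]
        by_cases hgt : m < t.foldl max m
        · have hne : ¬ (x = t.foldl max m) := by
            have := (PySem.List.le_foldl_max t m).1; omega
          simp [hgt, hne]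
        · have hne : ¬ (x = m) := by omega
          simp [hgt, hne]

-- A's running min/(count of min) tracker, characterised for an arbitrary start state.
lemma pvMinFold_eq (L : List Int) (m mc : Int) :
    L.foldl pvMinStep (m, mc)
      = (L.foldl min m,
         if L.foldl min m < m then (List.count (L.foldl min m) L : Int)
         else mc + List.count m L) := by
  induction L generalizing m mc with
  | nil => simp
  | cons x t ih =>
      have hle := (PySem.List.foldl_min_le t x).1
      rcases lt_trichotomy x m with h | h | h
      · have hstep : pvMinStep (m, mc) x = (x, 1) := by simp [pvMinStep, h]
        have hmin : min m x = x := by omega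
        simp only [List.foldl_cons, hstep, ih, hmin]
        have hMm : t.foldl min x < m := lt_of_le_of_lt hle h
        simp only [hMm, if_pos]
        by_cases hgt : t.foldl min x < x
        · have hne : ¬ (x = t.foldl min x) := by omega
          simp [hgt, hne]
        · have hx : t.foldl min x = x := by omega
          simp [hx]
          omega
      · have hstep : pvMinStep (m, mc) x = (m, mc + 1) := by
          simp [pvMinStep, h]
        have hmin : min m x = m := by omega
        simp only [List.foldl_cons, hstep, ih, hmin]
        by_cases hgt : t.foldl min m < m
        · have hne : ¬ (x = t.foldl min m) := by omega
          simp [hgt, hne]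
        · simp [List.count_cons, h]
          omega
      · have hstep : pvMinStep (m, mc) x = (m, mc) := by
          simp only [pvMinStep]
          rw [if_neg (by omega), if_neg (by omega)]
        have hmin : min m x = m := by omega
        simp only [List.foldl_cons, hstep, ih, hmin]
        by_cases hgt : t.foldl min m < m
        · have hne : ¬ (x = t.foldl min m) := by omega
          simp [hgt, hne]
        · have hne : ¬ (x = m) := by omega
          simp [hgt, hne]

-- keys of B's nested counting loop = A's flat set (same list)
lemma pvKeys_counts (sts : List (List String)) (d : PySem.Dict String Int) :
    (sts.foldl (fun d s => (PySem.Set.ofList s).foldl (fun d t => d.modify t 0 (· + 1)) d) d).keys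
      = sts.foldl (fun acc e => PySem.Set.union acc (PySem.Set.ofList e)) d.keys := by
  induction sts generalizing d with
  | nil => rfl
  | cons s t ih =>
      simp only [List.foldl_cons, ih, PySem.Dict.keys_foldl_modify]
      rfl

-- value stored for a topic = number of subjects containing it
lemma pvGetD_counts (sts : List (List String)) (d : PySem.Dict String Int) (t : String) :
    (sts.foldl (fun d s => (PySem.Set.ofList s).foldl (fun d t => d.modify t 0 (· + 1)) d) d).getD t 0
      = d.getD t 0 + (sts.countP (fun s => decide (t ∈ s)) : Int) := by
  induction sts generalizing d with
  | nil => simp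
  | cons s rest ih =>
      simp only [List.foldl_cons, ih, PySem.Dict.getD_foldl_modify_add_one]
      have hc : List.count t (PySem.Set.ofList s) = if t ∈ s then 1 else 0 := by
        by_cases h : t ∈ s
        · rw [if_pos h]
          exact List.count_eq_one_of_mem (PySem.Set.nodup_ofList s)
            ((PySem.Set.mem_ofList s t).2 h)
        · simp [h, List.count_eq_zero.2 (fun hm => h ((PySem.Set.mem_ofList s t).1 hm))]
      rw [hc]
      by_cases h : t ∈ s
      · simp [h]
        omega
      · simp [h]

lemma pvOcc_eq_countP (sts : List (List String)) (t : String) :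
    numOfOccurences sts t = (sts.countP (fun s => decide (t ∈ s)) : Int) := by
  have := PySem.List.foldl_if_add_one (fun s : List String => decide (t ∈ s)) sts 0
  simpa [numOfOccurences] using this

lemma pvNodup_flat (sts : List (List String)) (s0 : PySem.Set String) (h : s0.Nodup) :
    (sts.foldl (fun acc e => PySem.Set.union acc (PySem.Set.ofList e)) s0).Nodup := by
  induction sts generalizing s0 with
  | nil => exact h
  | cons s rest ih => exact ih _ (PySem.Set.nodup_union _ _ h)

-- splitting A's combined tracker fold into its independent max and min halves
lemma pvSplit (flat : List String) (f : String → Int) (a b : Int × Int) :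
    flat.foldl (fun st topic => (pvMaxStep st.1 (f topic), pvMinStep st.2 (f topic))) (a, b)
      = ((flat.map f).foldl pvMaxStep a, (flat.map f).foldl pvMinStep b) := by
  induction flat generalizing a b with
  | nil => rfl
  | cons s rest ih => simp [ih]

-- A's two trackers over a value list L = B's counts of the seeded extrema of L
lemma pvFinal (L : List Int) :
    ([(L.foldl pvMaxStep (0, 0)).2, (L.foldl pvMinStep (99999999999, 0)).2] : List Int)
      = [PySem.List.count L ((PySem.List.max? (((0 : Int) :: L)) (fun v => v)).getD 0),
         PySem.List.count L ((PySem.List.min? (((99999999999 : Int) :: L)) (fun v => v)).getD 0)] := by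
  have hM := (PySem.List.le_foldl_max L (0 : Int)).1
  have hm := (PySem.List.foldl_min_le L (99999999999 : Int)).1
  rw [pvMaxFold_eq, pvMinFold_eq, PySem.List.max?_id_cons, PySem.List.min?_id_cons]
  simp only [Option.getD_some, PySem.List.count_eq]
  refine List.cons_eq_cons.mpr ⟨?_, List.cons_eq_cons.mpr ⟨?_, rfl⟩⟩
  · by_cases h : L.foldl max 0 > 0
    · simp [h]
    · have h0 : L.foldl max 0 = 0 := by omega
      simp [h, h0]
  · by_cases h : L.foldl min 99999999999 < 99999999999
    · simp [h]
    · have h0 : L.foldl min 99999999999 = 99999999999 := by omega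
      simp [h, h0]

-- ===== VERDICT (by name: the statement is the Claim_ definition above) =====
theorem trending_spec : Claim_equal_trending := by
  intro sts _dom
  unfold Spec_trending trending trending_alt
  have hkeys : (sts.foldl (fun d s =>
        (PySem.Set.ofList s).foldl (fun d t => d.modify t 0 (· + 1)) d) (PySem.Dict.empty : PySem.Dict String Int)).keys
      = sts.foldl (fun acc e => PySem.Set.union acc (PySem.Set.ofList e)) PySem.Set.empty := by
    simpa using pvKeys_counts sts (PySem.Dict.empty : PySem.Dict String Int)
  have hnodupkeys : (sts.foldl (fun d s =>
        (PySem.Set.ofList s).foldl (fun d t => d.modify t 0 (· + 1)) d) (PySem.Dict.empty : PySem.Dict String Int)).keys.Nodup := by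
    rw [hkeys]; exact pvNodup_flat sts PySem.Set.empty List.nodup_nil
  have hvals : (sts.foldl (fun d s =>
        (PySem.Set.ofList s).foldl (fun d t => d.modify t 0 (· + 1)) d) (PySem.Dict.empty : PySem.Dict String Int)).values
      = (sts.foldl (fun acc e => PySem.Set.union acc (PySem.Set.ofList e))
          PySem.Set.empty).map (fun t => numOfOccurences sts t) := by
    rw [PySem.Dict.values_eq_map_keys _ hnodupkeys 0, hkeys]
    refine List.map_congr_left (fun t _ => ?_)
    rw [pvGetD_counts, pvOcc_eq_countP]
    simp
  simp only [pvSplit, hvals]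
  exact pvFinal _
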